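-- pv_equiv track=rewrite | github.com/DeepFoldProtein/plmMSA | src/plmmsa/templates/render.py | render_hit_match_only
-- ===== SOURCE A (Python) =====
-- from collections.abc import Sequence
--
-- def render_hit_match_only(
--     query_len: int,
--     target_seq: str,
--     columns: Sequence[tuple[int, int]],
-- ) -> str:
--     """Render an A3M row containing only match-state slots.
--
--     `columns` is an OTalign-style alignment path: each `(qi, ti)` is a
--     column in the alignment, with `-1` marking a gap on that side. The
--     only columns that contribute to the rendered row are
--     `(qi>=0, ti>=0)` (match columns), where the template residue at
--     index `ti` lands in slot `qi`. Columns with `qi=-1, ti>=0` (template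
--     residues without a query column) are dropped — the pipeline does
--     NOT emit lowercase insertions. Columns with `qi>=0, ti=-1` (gap in
--     target) leave the slot at its default `-`.
--
--     Slots not covered by any match column stay as `-`. This guarantees
--     the output is exactly `query_len` characters and contains only
--     uppercase residues + `-`.
--     """
--     slots = ["-"] * query_len
--     for qi, ti in columns:
--         if 0 <= qi < query_len and ti >= 0:
--             slots[qi] = target_seq[ti].upper()
--     return "".join(slots)
-- ===== SOURCE B (Python) =====
-- def render_hit_match_only(query_len, target_seq, columns):
--     # Gather formulation: each slot is computed independently by scanning the
--     # alignment columns backwards for the last match column that lands in it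
--     # (the last write wins in A's scatter loop = the first hit when scanning
--     # in reverse).
--     def slot_char(i):
--         for qi, ti in reversed(columns):
--             if qi == i and ti >= 0:
--                 return target_seq[ti].upper()
--         return "-"
--     return "".join(map(slot_char, range(query_len)))
-- ===== Notes on version B (the rewrite author's own statement) =====
-- stated objective: alternative
-- what changed: Inverts the loops: instead of A's single scatter pass writing each match column into a preallocated slot list, B computes each output position independently, scanning the columns in reverse for the last match column landing in that slot (gather with early exit, no mutable row).
import Mathlib
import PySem

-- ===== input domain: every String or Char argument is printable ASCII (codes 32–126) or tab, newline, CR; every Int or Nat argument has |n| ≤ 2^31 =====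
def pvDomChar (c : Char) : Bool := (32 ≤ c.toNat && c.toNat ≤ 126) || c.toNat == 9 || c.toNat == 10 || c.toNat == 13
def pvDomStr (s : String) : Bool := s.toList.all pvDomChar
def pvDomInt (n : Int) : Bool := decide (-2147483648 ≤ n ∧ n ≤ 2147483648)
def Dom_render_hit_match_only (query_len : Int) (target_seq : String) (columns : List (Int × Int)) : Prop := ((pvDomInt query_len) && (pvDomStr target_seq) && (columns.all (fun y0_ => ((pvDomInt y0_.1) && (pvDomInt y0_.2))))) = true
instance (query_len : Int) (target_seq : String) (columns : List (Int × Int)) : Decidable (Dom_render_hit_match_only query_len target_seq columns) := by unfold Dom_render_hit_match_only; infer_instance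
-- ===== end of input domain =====

-- B inverts the loops (gather vs scatter): each output slot is computed by scanning the
-- columns in reverse for the last match landing in it, instead of A's scatter-writes
-- into a preallocated slot list (alternative; not faster).


-- ===== PORT A =====
-- slots = ["-"] * query_len; scatter-write each match column; "".join(slots)
def render_hit_match_only (query_len : Int) (target_seq : String) (columns : List (Int × Int)) : String :=
  let slots : List Char := List.replicate query_len.toNat '-'
  let slots := columns.foldl (fun slots c =>
    if 0 ≤ c.1 ∧ c.1 < query_len ∧ 0 ≤ c.2 then
      -- target_seq[c.2] : in range under Pre_ (pyGetD is the total form of the indexing)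
      PySem.List.pySetD slots c.1
        (PySem.Chars.upperChar (PySem.List.pyGetD target_seq.toList c.2 '-'))
    else slots) slots
  String.ofList slots

-- ===== PORT B =====
-- def slot_char(i): for qi, ti in reversed(columns): if qi == i and ti >= 0: return
-- target_seq[ti].upper(); return "-"   (first hit of the reversed scan, early exit = find?)
def pvSlotChar (target_seq : String) (columns : List (Int × Int)) (i : Int) : Char :=
  match columns.reverse.find? (fun c => c.1 == i && decide (0 ≤ c.2)) with
  | some c => PySem.Chars.upperChar (PySem.List.pyGetD target_seq.toList c.2 '-')
  | none => '-'

-- "".join(map(slot_char, range(query_len)))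
def render_hit_match_only_alt (query_len : Int) (target_seq : String) (columns : List (Int × Int)) : String :=
  String.ofList ((PySem.List.pyRange 0 query_len 1).map (pvSlotChar target_seq columns))

-- ===== PRECONDITION & SPEC =====
-- Pre_ excludes exactly the inputs where A raises IndexError: a contributing match
-- column (0<=qi<query_len, ti>=0) whose ti is past the end of target_seq.
def Pre_render_hit_match_only (query_len : Int) (target_seq : String) (columns : List (Int × Int)) : Prop :=
  ∀ c ∈ columns, 0 ≤ c.1 → c.1 < query_len → 0 ≤ c.2 → c.2 < (target_seq.toList.length : Int)
instance (query_len : Int) (target_seq : String) (columns : List (Int × Int)) : Decidable (Pre_render_hit_match_only query_len target_seq columns) := by unfold Pre_render_hit_match_only; infer_instance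

def pvWitness_render_hit_match_only : Int × String × (List (Int × Int)) :=
  (4, "abC", [(0, 2), (2, 0), (2, 1), (1, -1), (-1, 1), (5, 0)])

def Spec_render_hit_match_only (query_len : Int) (target_seq : String) (columns : List (Int × Int)) (out : String) : Prop := out = render_hit_match_only_alt query_len target_seq columns
instance (query_len : Int) (target_seq : String) (columns : List (Int × Int)) (out : String) : Decidable (Spec_render_hit_match_only query_len target_seq columns out) := by unfold Spec_render_hit_match_only; infer_instance

-- ===== CLAIM (what is proved, stated in full; the proofs are below) =====
def Claim_equal_render_hit_match_only : Prop := ∀ (query_len : Int) (target_seq : String) (columns : List (Int × Int)), Dom_render_hit_match_only query_len target_seq columns → Pre_render_hit_match_only query_len target_seq columns → Spec_render_hit_match_only query_len target_seq columns (render_hit_match_only query_len target_seq columns)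

-- ===== LEMMAS AND PROOFS =====

-- A's scatter loop, read per position: the slot at i holds the value of the FIRST
-- column of the REVERSED list that writes to i (last write wins), else the old value.
theorem pv_foldA (query_len : Int) (target_seq : String) (columns : List (Int × Int))
    (slots : List Char) (hlen : slots.length = query_len.toNat) :
    (columns.foldl (fun slots c =>
      if 0 ≤ c.1 ∧ c.1 < query_len ∧ 0 ≤ c.2 then
        PySem.List.pySetD slots c.1
          (PySem.Chars.upperChar (PySem.List.pyGetD target_seq.toList c.2 '-'))
      else slots) slots).length = query_len.toNat ∧
    ∀ i : Nat, i < query_len.toNat →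
      (columns.foldl (fun slots c =>
        if 0 ≤ c.1 ∧ c.1 < query_len ∧ 0 ≤ c.2 then
          PySem.List.pySetD slots c.1
            (PySem.Chars.upperChar (PySem.List.pyGetD target_seq.toList c.2 '-'))
        else slots) slots).getD i '-' =
      match columns.reverse.find?
          (fun c => decide (0 ≤ c.1 ∧ c.1 < query_len ∧ 0 ≤ c.2) && (c.1 == (i : Int))) with
      | some c => PySem.Chars.upperChar (PySem.List.pyGetD target_seq.toList c.2 '-')
      | none => slots.getD i '-' := by
  induction columns generalizing slots with
  | nil => exact ⟨hlen, fun i _ => rfl⟩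
  | cons c cs ih =>
    simp only [List.foldl_cons, List.reverse_cons]
    by_cases hc : 0 ≤ c.1 ∧ c.1 < query_len ∧ 0 ≤ c.2
    · simp only [if_pos hc]
      have hlen' : (PySem.List.pySetD slots c.1
          (PySem.Chars.upperChar (PySem.List.pyGetD target_seq.toList c.2 '-'))).length
          = query_len.toNat := by
        rw [PySem.List.pySetD_of_nonneg _ _ hc.1, List.length_set, hlen]
      obtain ⟨h1, h2⟩ := ih _ hlen'
      refine ⟨h1, fun i hi => ?_⟩
      rw [h2 i hi, List.find?_append]
      cases hfind : cs.reverse.find?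
          (fun c => decide (0 ≤ c.1 ∧ c.1 < query_len ∧ 0 ≤ c.2) && (c.1 == (i : Int))) with
      | some c' => simp [Option.or]
      | none =>
        simp only [Option.or]  -- fall through to [c]
        rw [PySem.List.pySetD_of_nonneg _ _ hc.1]
        by_cases he : c.1 = (i : Int)
        · have hlt : (i : Int) < query_len := he ▸ hc.2.1
          have hp : (decide (0 ≤ c.1 ∧ c.1 < query_len ∧ 0 ≤ c.2) && (c.1 == (i : Int)))
              = true := by simp [hc.2.2, he, hlt]
          rw [List.find?_cons_of_pos (by rw [hp])]
          have hieq : i = c.1.toNat := by omega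
          rw [hieq, List.getD_eq_getElem _ _ (by rw [List.length_set, hlen]; omega),
            List.getElem_set_self]
        · have hp : (decide (0 ≤ c.1 ∧ c.1 < query_len ∧ 0 ≤ c.2) && (c.1 == (i : Int)))
              = false := by simp [he]
          rw [List.find?_cons_of_neg (by rw [hp]; exact Bool.false_ne_true)]
          rw [List.getD, List.getD, List.getElem?_set_ne (by omega)]
          rfl
    · simp only [if_neg hc]
      obtain ⟨h1, h2⟩ := ih slots hlen
      refine ⟨h1, fun i hi => ?_⟩
      rw [h2 i hi, List.find?_append]
      have : (decide (0 ≤ c.1 ∧ c.1 < query_len ∧ 0 ≤ c.2) && (c.1 == (i : Int))) = false := by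
        simp [hc]
      cases hfind : cs.reverse.find?
          (fun c => decide (0 ≤ c.1 ∧ c.1 < query_len ∧ 0 ≤ c.2) && (c.1 == (i : Int))) with
      | some c' => simp [Option.or]
      | none =>
        simp only [Option.or]
        rw [List.find?_cons_of_neg (by rw [this]; exact Bool.false_ne_true)]
        rfl

-- For a position i inside [0, query_len), A's reversed-scan predicate coincides with B's.
theorem pv_pred_eq (query_len : Int) (i : Nat) (hi : i < query_len.toNat) :
    (fun c : Int × Int => decide (0 ≤ c.1 ∧ c.1 < query_len ∧ 0 ≤ c.2) && (c.1 == (i : Int)))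
    = (fun c : Int × Int => c.1 == (i : Int) && decide (0 ≤ c.2)) := by
  funext c
  by_cases he : c.1 = (i : Int)
  · have h1 : (0 : Int) ≤ c.1 := by omega
    have h2 : c.1 < query_len := by omega
    have h2' : (i : Int) < query_len := he ▸ h2
    by_cases h3 : (0 : Int) ≤ c.2 <;> simp [he, h2', h3]
  · have hne : (c.1 == (i : Int)) = false := by simp [he]
    rw [hne]
    simp

-- ===== VERDICT (by name: the statement is the Claim_ definition above) =====
theorem render_hit_match_only_spec : Claim_equal_render_hit_match_only := by
  intro query_len target_seq columns _ _
  unfold Spec_render_hit_match_only render_hit_match_only render_hit_match_only_alt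
  dsimp only
  obtain ⟨hlen, hrel⟩ := pv_foldA query_len target_seq columns
    (List.replicate query_len.toNat '-') (by simp)
  congr 1
  apply List.ext_getElem
  · rw [hlen, List.length_map, PySem.List.length_pyRange_one]
    omega
  · intro k h1 h2
    have hk : k < query_len.toNat := by omega
    have := hrel k hk
    rw [List.getD_eq_getElem _ _ (by omega)] at this
    rw [this, List.getElem_map, PySem.List.getElem_pyRange_one, zero_add,
      pvSlotChar, pv_pred_eq query_len k hk]
    cases columns.reverse.find? (fun c => c.1 == (k : Int) && decide (0 ≤ c.2)) with
    | some c => rfl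
    | none => simp
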